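/-
  EXAMPLES: texts of the test corpus (proofs/c6/corpus.py, VALID) with their layouts, written by proofs/c6/tools/genexamples.py. For each text `X`:
    X.text          the bytes                       X.w1, X.layout, X.w2   the JSON text as whitespace ++ layout ++ whitespace
    X.text_eq       the layout renders to the text  X.wf                   it is well-formed (numbers, strings, whitespace)   — both by `decide`
    X.prints        hence `Prints X.layout.value X.text`: the text is valid JSON by the grammar of Json/Grammar.lean
    X.run_d / X.run_s   the model, EVALUATED on the text (token array of `count` zero tokens), gives `count` and exactly the expected tokens
                        (`Layout.tokens`), in both compiled configurations: a check of the definitions against the program, independent of the proofs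
    X.valid_d / X.valid_s (X.invalid_s)   the instances of the theorems of Json/Jsmn/CorrectMain.lean: every token array, any initial content
-/
import Json.Jsmn.CorrectMain
import Json.GrammarCheck

set_option maxRecDepth 100000
namespace Json.Examples
open Jsmn Json

/-! ### escapes: '"\\"\\\\\\/\\b\\f\\n\\r\\t"' -/
def escapes.text : List UInt8 :=
  [0x22, 0x5c, 0x22, 0x5c, 0x5c, 0x5c, 0x2f, 0x5c, 0x62, 0x5c, 0x66, 0x5c, 0x6e, 0x5c, 0x72, 0x5c, 0x74, 0x22]
def escapes.w1 : List UInt8 := []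
def escapes.w2 : List UInt8 := []
def escapes.layout : Layout :=
  .string [0x5c, 0x22, 0x5c, 0x5c, 0x5c, 0x2f, 0x5c, 0x62, 0x5c, 0x66, 0x5c, 0x6e, 0x5c, 0x72, 0x5c, 0x74]
theorem escapes.text_eq : escapes.w1 ++ escapes.layout.text ++ escapes.w2 = escapes.text := by decide +kernel
theorem escapes.wf : escapes.layout.WellFormed := by decide +kernel
theorem escapes.prints : Prints escapes.layout.value escapes.text := Prints.of_layout (by decide) (by decide) escapes.wf escapes.text_eq
theorem escapes.run_d : run Config.default escapes.text (some (List.replicate escapes.layout.count default)) escapes.layout.count =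
    some ((escapes.layout.count : Int), some (escapes.layout.tokens escapes.w1.length 0 (-1) |>.map fun t => { t with parent := 0 })) := by decide +kernel
theorem escapes.run_s : run Config.strictLinks escapes.text (some (List.replicate escapes.layout.count default)) escapes.layout.count =
    some ((escapes.layout.count : Int), some (escapes.layout.tokens escapes.w1.length 0 (-1))) := by decide +kernel
theorem escapes.valid_d (n : Nat) (ts0 : Tokens) (h0 : ts0.length = n) (hn : n ≤ 2147483648) (hc : escapes.layout.count ≤ n) :
    run Config.default escapes.text (some ts0) n =
      some ((escapes.layout.count : Int), some (stamp Config.default (escapes.layout.tokens escapes.w1.length 0 (-1)) ts0 ++ ts0.drop escapes.layout.count)) := by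
  rw [← escapes.text_eq]; exact run_default_valid escapes.w1 escapes.layout escapes.w2 (by decide) (by decide) escapes.wf (by decide +kernel) n ts0 h0 hn hc
theorem escapes.valid_s (n : Nat) (ts0 : Tokens) (h0 : ts0.length = n) (hn : n ≤ 2147483648) (hc : escapes.layout.count ≤ n) :
    run Config.strictLinks escapes.text (some ts0) n = some ((escapes.layout.count : Int), some (escapes.layout.tokens escapes.w1.length 0 (-1) ++ ts0.drop escapes.layout.count)) := by
  rw [← escapes.text_eq]; exact run_strictLinks_valid escapes.w1 escapes.layout escapes.w2 (by decide) (by decide) escapes.wf (by decide) (by decide +kernel) n ts0 h0 hn hc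

/-! ### unicode: '"\\u0041\\u00e9\\uD834\\uDD1E\\uabcd\\uABCD\\u0000"' -/
def unicode.text : List UInt8 :=
  [0x22, 0x5c, 0x75, 0x30, 0x30, 0x34, 0x31, 0x5c, 0x75, 0x30, 0x30, 0x65, 0x39, 0x5c, 0x75, 0x44, 0x38, 0x33, 0x34, 0x5c, 0x75, 0x44, 0x44, 0x31, 0x45, 0x5c, 0x75, 0x61, 0x62, 0x63, 0x64, 0x5c, 0x75, 0x41, 0x42, 0x43, 0x44, 0x5c, 0x75, 0x30, 0x30, 0x30, 0x30, 0x22]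
def unicode.w1 : List UInt8 := []
def unicode.w2 : List UInt8 := []
def unicode.layout : Layout :=
  .string [0x5c, 0x75, 0x30, 0x30, 0x34, 0x31, 0x5c, 0x75, 0x30, 0x30, 0x65, 0x39, 0x5c, 0x75, 0x44, 0x38, 0x33, 0x34, 0x5c, 0x75, 0x44, 0x44, 0x31, 0x45, 0x5c, 0x75, 0x61, 0x62, 0x63, 0x64, 0x5c, 0x75, 0x41, 0x42, 0x43, 0x44, 0x5c, 0x75, 0x30, 0x30, 0x30, 0x30]
theorem unicode.text_eq : unicode.w1 ++ unicode.layout.text ++ unicode.w2 = unicode.text := by decide +kernel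
theorem unicode.wf : unicode.layout.WellFormed := by decide +kernel
theorem unicode.prints : Prints unicode.layout.value unicode.text := Prints.of_layout (by decide) (by decide) unicode.wf unicode.text_eq
theorem unicode.run_d : run Config.default unicode.text (some (List.replicate unicode.layout.count default)) unicode.layout.count =
    some ((unicode.layout.count : Int), some (unicode.layout.tokens unicode.w1.length 0 (-1) |>.map fun t => { t with parent := 0 })) := by decide +kernel
theorem unicode.run_s : run Config.strictLinks unicode.text (some (List.replicate unicode.layout.count default)) unicode.layout.count =
    some ((unicode.layout.count : Int), some (unicode.layout.tokens unicode.w1.length 0 (-1))) := by decide +kernel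
theorem unicode.valid_d (n : Nat) (ts0 : Tokens) (h0 : ts0.length = n) (hn : n ≤ 2147483648) (hc : unicode.layout.count ≤ n) :
    run Config.default unicode.text (some ts0) n =
      some ((unicode.layout.count : Int), some (stamp Config.default (unicode.layout.tokens unicode.w1.length 0 (-1)) ts0 ++ ts0.drop unicode.layout.count)) := by
  rw [← unicode.text_eq]; exact run_default_valid unicode.w1 unicode.layout unicode.w2 (by decide) (by decide) unicode.wf (by decide +kernel) n ts0 h0 hn hc
theorem unicode.valid_s (n : Nat) (ts0 : Tokens) (h0 : ts0.length = n) (hn : n ≤ 2147483648) (hc : unicode.layout.count ≤ n) :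
    run Config.strictLinks unicode.text (some ts0) n = some ((unicode.layout.count : Int), some (unicode.layout.tokens unicode.w1.length 0 (-1) ++ ts0.drop unicode.layout.count)) := by
  rw [← unicode.text_eq]; exact run_strictLinks_valid unicode.w1 unicode.layout unicode.w2 (by decide) (by decide) unicode.wf (by decide) (by decide +kernel) n ts0 h0 hn hc

/-! ### esc_in_key: '{"a\\"b":"c\\\\"}' -/
def esc_in_key.text : List UInt8 :=
  [0x7b, 0x22, 0x61, 0x5c, 0x22, 0x62, 0x22, 0x3a, 0x22, 0x63, 0x5c, 0x5c, 0x22, 0x7d]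
def esc_in_key.w1 : List UInt8 := []
def esc_in_key.w2 : List UInt8 := []
def esc_in_key.layout : Layout :=
  .object [] (.cons [] [0x61, 0x5c, 0x22, 0x62] [] [] (.string [0x63, 0x5c, 0x5c]) [] .nil)
theorem esc_in_key.text_eq : esc_in_key.w1 ++ esc_in_key.layout.text ++ esc_in_key.w2 = esc_in_key.text := by decide +kernel
theorem esc_in_key.wf : esc_in_key.layout.WellFormed := by decide +kernel
theorem esc_in_key.prints : Prints esc_in_key.layout.value esc_in_key.text := Prints.of_layout (by decide) (by decide) esc_in_key.wf esc_in_key.text_eq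
theorem esc_in_key.run_d : run Config.default esc_in_key.text (some (List.replicate esc_in_key.layout.count default)) esc_in_key.layout.count =
    some ((esc_in_key.layout.count : Int), some (esc_in_key.layout.tokens esc_in_key.w1.length 0 (-1) |>.map fun t => { t with parent := 0 })) := by decide +kernel
theorem esc_in_key.run_s : run Config.strictLinks esc_in_key.text (some (List.replicate esc_in_key.layout.count default)) esc_in_key.layout.count =
    some ((esc_in_key.layout.count : Int), some (esc_in_key.layout.tokens esc_in_key.w1.length 0 (-1))) := by decide +kernel
theorem esc_in_key.valid_d (n : Nat) (ts0 : Tokens) (h0 : ts0.length = n) (hn : n ≤ 2147483648) (hc : esc_in_key.layout.count ≤ n) :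
    run Config.default esc_in_key.text (some ts0) n =
      some ((esc_in_key.layout.count : Int), some (stamp Config.default (esc_in_key.layout.tokens esc_in_key.w1.length 0 (-1)) ts0 ++ ts0.drop esc_in_key.layout.count)) := by
  rw [← esc_in_key.text_eq]; exact run_default_valid esc_in_key.w1 esc_in_key.layout esc_in_key.w2 (by decide) (by decide) esc_in_key.wf (by decide +kernel) n ts0 h0 hn hc
theorem esc_in_key.valid_s (n : Nat) (ts0 : Tokens) (h0 : ts0.length = n) (hn : n ≤ 2147483648) (hc : esc_in_key.layout.count ≤ n) :
    run Config.strictLinks esc_in_key.text (some ts0) n = some ((esc_in_key.layout.count : Int), some (esc_in_key.layout.tokens esc_in_key.w1.length 0 (-1) ++ ts0.drop esc_in_key.layout.count)) := by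
  rw [← esc_in_key.text_eq]; exact run_strictLinks_valid esc_in_key.w1 esc_in_key.layout esc_in_key.w2 (by decide) (by decide) esc_in_key.wf (by decide) (by decide +kernel) n ts0 h0 hn hc

/-! ### utf8: '"h\xc3\xa9llo \xe4\xb8\x96\xe7\x95\x8c \xf0\x9d\x84\x9e"' -/
def utf8.text : List UInt8 :=
  [0x22, 0x68, 0xc3, 0xa9, 0x6c, 0x6c, 0x6f, 0x20, 0xe4, 0xb8, 0x96, 0xe7, 0x95, 0x8c, 0x20, 0xf0, 0x9d, 0x84, 0x9e, 0x22]
def utf8.w1 : List UInt8 := []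
def utf8.w2 : List UInt8 := []
def utf8.layout : Layout :=
  .string [0x68, 0xc3, 0xa9, 0x6c, 0x6c, 0x6f, 0x20, 0xe4, 0xb8, 0x96, 0xe7, 0x95, 0x8c, 0x20, 0xf0, 0x9d, 0x84, 0x9e]
theorem utf8.text_eq : utf8.w1 ++ utf8.layout.text ++ utf8.w2 = utf8.text := by decide +kernel
theorem utf8.wf : utf8.layout.WellFormed := by decide +kernel
theorem utf8.prints : Prints utf8.layout.value utf8.text := Prints.of_layout (by decide) (by decide) utf8.wf utf8.text_eq
theorem utf8.run_d : run Config.default utf8.text (some (List.replicate utf8.layout.count default)) utf8.layout.count =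
    some ((utf8.layout.count : Int), some (utf8.layout.tokens utf8.w1.length 0 (-1) |>.map fun t => { t with parent := 0 })) := by decide +kernel
theorem utf8.run_s : run Config.strictLinks utf8.text (some (List.replicate utf8.layout.count default)) utf8.layout.count =
    some ((utf8.layout.count : Int), some (utf8.layout.tokens utf8.w1.length 0 (-1))) := by decide +kernel
theorem utf8.valid_d (n : Nat) (ts0 : Tokens) (h0 : ts0.length = n) (hn : n ≤ 2147483648) (hc : utf8.layout.count ≤ n) :
    run Config.default utf8.text (some ts0) n =
      some ((utf8.layout.count : Int), some (stamp Config.default (utf8.layout.tokens utf8.w1.length 0 (-1)) ts0 ++ ts0.drop utf8.layout.count)) := by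
  rw [← utf8.text_eq]; exact run_default_valid utf8.w1 utf8.layout utf8.w2 (by decide) (by decide) utf8.wf (by decide +kernel) n ts0 h0 hn hc
theorem utf8.valid_s (n : Nat) (ts0 : Tokens) (h0 : ts0.length = n) (hn : n ≤ 2147483648) (hc : utf8.layout.count ≤ n) :
    run Config.strictLinks utf8.text (some ts0) n = some ((utf8.layout.count : Int), some (utf8.layout.tokens utf8.w1.length 0 (-1) ++ ts0.drop utf8.layout.count)) := by
  rw [← utf8.text_eq]; exact run_strictLinks_valid utf8.w1 utf8.layout utf8.w2 (by decide) (by decide) utf8.wf (by decide) (by decide +kernel) n ts0 h0 hn hc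

/-! ### str_specials: '"{}[],:  true 1"' -/
def str_specials.text : List UInt8 :=
  [0x22, 0x7b, 0x7d, 0x5b, 0x5d, 0x2c, 0x3a, 0x20, 0x20, 0x74, 0x72, 0x75, 0x65, 0x20, 0x31, 0x22]
def str_specials.w1 : List UInt8 := []
def str_specials.w2 : List UInt8 := []
def str_specials.layout : Layout :=
  .string [0x7b, 0x7d, 0x5b, 0x5d, 0x2c, 0x3a, 0x20, 0x20, 0x74, 0x72, 0x75, 0x65, 0x20, 0x31]
theorem str_specials.text_eq : str_specials.w1 ++ str_specials.layout.text ++ str_specials.w2 = str_specials.text := by decide +kernel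
theorem str_specials.wf : str_specials.layout.WellFormed := by decide +kernel
theorem str_specials.prints : Prints str_specials.layout.value str_specials.text := Prints.of_layout (by decide) (by decide) str_specials.wf str_specials.text_eq
theorem str_specials.run_d : run Config.default str_specials.text (some (List.replicate str_specials.layout.count default)) str_specials.layout.count =
    some ((str_specials.layout.count : Int), some (str_specials.layout.tokens str_specials.w1.length 0 (-1) |>.map fun t => { t with parent := 0 })) := by decide +kernel
theorem str_specials.run_s : run Config.strictLinks str_specials.text (some (List.replicate str_specials.layout.count default)) str_specials.layout.count =
    some ((str_specials.layout.count : Int), some (str_specials.layout.tokens str_specials.w1.length 0 (-1))) := by decide +kernel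
theorem str_specials.valid_d (n : Nat) (ts0 : Tokens) (h0 : ts0.length = n) (hn : n ≤ 2147483648) (hc : str_specials.layout.count ≤ n) :
    run Config.default str_specials.text (some ts0) n =
      some ((str_specials.layout.count : Int), some (stamp Config.default (str_specials.layout.tokens str_specials.w1.length 0 (-1)) ts0 ++ ts0.drop str_specials.layout.count)) := by
  rw [← str_specials.text_eq]; exact run_default_valid str_specials.w1 str_specials.layout str_specials.w2 (by decide) (by decide) str_specials.wf (by decide +kernel) n ts0 h0 hn hc
theorem str_specials.valid_s (n : Nat) (ts0 : Tokens) (h0 : ts0.length = n) (hn : n ≤ 2147483648) (hc : str_specials.layout.count ≤ n) :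
    run Config.strictLinks str_specials.text (some ts0) n = some ((str_specials.layout.count : Int), some (str_specials.layout.tokens str_specials.w1.length 0 (-1) ++ ts0.drop str_specials.layout.count)) := by
  rw [← str_specials.text_eq]; exact run_strictLinks_valid str_specials.w1 str_specials.layout str_specials.w2 (by decide) (by decide) str_specials.wf (by decide) (by decide +kernel) n ts0 h0 hn hc

/-! ### ws_all: ' \t\r\n[ \t\r\n1 \t\r\n, \t\r\n2 \t\r\n] \t\r\n' -/
def ws_all.text : List UInt8 :=
  [0x20, 0x09, 0x0d, 0x0a, 0x5b, 0x20, 0x09, 0x0d, 0x0a, 0x31, 0x20, 0x09, 0x0d, 0x0a, 0x2c, 0x20, 0x09, 0x0d, 0x0a, 0x32, 0x20, 0x09, 0x0d, 0x0a, 0x5d, 0x20, 0x09, 0x0d, 0x0a]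
def ws_all.w1 : List UInt8 := [0x20, 0x09, 0x0d, 0x0a]
def ws_all.w2 : List UInt8 := [0x20, 0x09, 0x0d, 0x0a]
def ws_all.layout : Layout :=
  .array [] (.cons [0x20, 0x09, 0x0d, 0x0a] (.number [0x31]) [0x20, 0x09, 0x0d, 0x0a] (.cons [0x20, 0x09, 0x0d, 0x0a] (.number [0x32]) [0x20, 0x09, 0x0d, 0x0a] .nil))
theorem ws_all.text_eq : ws_all.w1 ++ ws_all.layout.text ++ ws_all.w2 = ws_all.text := by decide +kernel
theorem ws_all.wf : ws_all.layout.WellFormed := by decide +kernel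
theorem ws_all.prints : Prints ws_all.layout.value ws_all.text := Prints.of_layout (by decide) (by decide) ws_all.wf ws_all.text_eq
theorem ws_all.run_d : run Config.default ws_all.text (some (List.replicate ws_all.layout.count default)) ws_all.layout.count =
    some ((ws_all.layout.count : Int), some (ws_all.layout.tokens ws_all.w1.length 0 (-1) |>.map fun t => { t with parent := 0 })) := by decide +kernel
theorem ws_all.run_s : run Config.strictLinks ws_all.text (some (List.replicate ws_all.layout.count default)) ws_all.layout.count =
    some ((ws_all.layout.count : Int), some (ws_all.layout.tokens ws_all.w1.length 0 (-1))) := by decide +kernel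
theorem ws_all.valid_d (n : Nat) (ts0 : Tokens) (h0 : ts0.length = n) (hn : n ≤ 2147483648) (hc : ws_all.layout.count ≤ n) :
    run Config.default ws_all.text (some ts0) n =
      some ((ws_all.layout.count : Int), some (stamp Config.default (ws_all.layout.tokens ws_all.w1.length 0 (-1)) ts0 ++ ts0.drop ws_all.layout.count)) := by
  rw [← ws_all.text_eq]; exact run_default_valid ws_all.w1 ws_all.layout ws_all.w2 (by decide) (by decide) ws_all.wf (by decide +kernel) n ts0 h0 hn hc
theorem ws_all.valid_s (n : Nat) (ts0 : Tokens) (h0 : ts0.length = n) (hn : n ≤ 2147483648) (hc : ws_all.layout.count ≤ n) :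
    run Config.strictLinks ws_all.text (some ts0) n = some ((ws_all.layout.count : Int), some (ws_all.layout.tokens ws_all.w1.length 0 (-1) ++ ts0.drop ws_all.layout.count)) := by
  rw [← ws_all.text_eq]; exact run_strictLinks_valid ws_all.w1 ws_all.layout ws_all.w2 (by decide) (by decide) ws_all.wf (by decide) (by decide +kernel) n ts0 h0 hn hc

/-! ### ws_obj: '{ "a" : 1 , "b" : [ ] , "c" : { } }' -/
def ws_obj.text : List UInt8 :=
  [0x7b, 0x20, 0x22, 0x61, 0x22, 0x20, 0x3a, 0x20, 0x31, 0x20, 0x2c, 0x20, 0x22, 0x62, 0x22, 0x20, 0x3a, 0x20, 0x5b, 0x20, 0x5d, 0x20, 0x2c, 0x20, 0x22, 0x63, 0x22, 0x20, 0x3a, 0x20, 0x7b, 0x20, 0x7d, 0x20, 0x7d]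
def ws_obj.w1 : List UInt8 := []
def ws_obj.w2 : List UInt8 := []
def ws_obj.layout : Layout :=
  .object [] (.cons [0x20] [0x61] [0x20] [0x20] (.number [0x31]) [0x20] (.cons [0x20] [0x62] [0x20] [0x20] (.array [0x20] .nil) [0x20] (.cons [0x20] [0x63] [0x20] [0x20] (.object [0x20] .nil) [0x20] .nil)))
theorem ws_obj.text_eq : ws_obj.w1 ++ ws_obj.layout.text ++ ws_obj.w2 = ws_obj.text := by decide +kernel
theorem ws_obj.wf : ws_obj.layout.WellFormed := by decide +kernel
theorem ws_obj.prints : Prints ws_obj.layout.value ws_obj.text := Prints.of_layout (by decide) (by decide) ws_obj.wf ws_obj.text_eq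
theorem ws_obj.run_d : run Config.default ws_obj.text (some (List.replicate ws_obj.layout.count default)) ws_obj.layout.count =
    some ((ws_obj.layout.count : Int), some (ws_obj.layout.tokens ws_obj.w1.length 0 (-1) |>.map fun t => { t with parent := 0 })) := by decide +kernel
theorem ws_obj.run_s : run Config.strictLinks ws_obj.text (some (List.replicate ws_obj.layout.count default)) ws_obj.layout.count =
    some ((ws_obj.layout.count : Int), some (ws_obj.layout.tokens ws_obj.w1.length 0 (-1))) := by decide +kernel
theorem ws_obj.valid_d (n : Nat) (ts0 : Tokens) (h0 : ts0.length = n) (hn : n ≤ 2147483648) (hc : ws_obj.layout.count ≤ n) :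
    run Config.default ws_obj.text (some ts0) n =
      some ((ws_obj.layout.count : Int), some (stamp Config.default (ws_obj.layout.tokens ws_obj.w1.length 0 (-1)) ts0 ++ ts0.drop ws_obj.layout.count)) := by
  rw [← ws_obj.text_eq]; exact run_default_valid ws_obj.w1 ws_obj.layout ws_obj.w2 (by decide) (by decide) ws_obj.wf (by decide +kernel) n ts0 h0 hn hc
theorem ws_obj.valid_s (n : Nat) (ts0 : Tokens) (h0 : ts0.length = n) (hn : n ≤ 2147483648) (hc : ws_obj.layout.count ≤ n) :
    run Config.strictLinks ws_obj.text (some ts0) n = some ((ws_obj.layout.count : Int), some (ws_obj.layout.tokens ws_obj.w1.length 0 (-1) ++ ts0.drop ws_obj.layout.count)) := by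
  rw [← ws_obj.text_eq]; exact run_strictLinks_valid ws_obj.w1 ws_obj.layout ws_obj.w2 (by decide) (by decide) ws_obj.wf (by decide) (by decide +kernel) n ts0 h0 hn hc

/-! ### compact: '{"a":1,"b":[true,false,null],"c":{"d":"e"}}' -/
def compact.text : List UInt8 :=
  [0x7b, 0x22, 0x61, 0x22, 0x3a, 0x31, 0x2c, 0x22, 0x62, 0x22, 0x3a, 0x5b, 0x74, 0x72, 0x75, 0x65, 0x2c, 0x66, 0x61, 0x6c, 0x73, 0x65, 0x2c, 0x6e, 0x75, 0x6c, 0x6c, 0x5d, 0x2c, 0x22, 0x63, 0x22, 0x3a, 0x7b, 0x22, 0x64, 0x22, 0x3a, 0x22, 0x65, 0x22, 0x7d, 0x7d]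
def compact.w1 : List UInt8 := []
def compact.w2 : List UInt8 := []
def compact.layout : Layout :=
  .object [] (.cons [] [0x61] [] [] (.number [0x31]) [] (.cons [] [0x62] [] [] (.array [] (.cons [] .true [] (.cons [] .false [] (.cons [] .null [] .nil)))) [] (.cons [] [0x63] [] [] (.object [] (.cons [] [0x64] [] [] (.string [0x65]) [] .nil)) [] .nil)))
theorem compact.text_eq : compact.w1 ++ compact.layout.text ++ compact.w2 = compact.text := by decide +kernel
theorem compact.wf : compact.layout.WellFormed := by decide +kernel
theorem compact.prints : Prints compact.layout.value compact.text := Prints.of_layout (by decide) (by decide) compact.wf compact.text_eq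
theorem compact.run_d : run Config.default compact.text (some (List.replicate compact.layout.count default)) compact.layout.count =
    some ((compact.layout.count : Int), some (compact.layout.tokens compact.w1.length 0 (-1) |>.map fun t => { t with parent := 0 })) := by decide +kernel
theorem compact.run_s : run Config.strictLinks compact.text (some (List.replicate compact.layout.count default)) compact.layout.count =
    some ((compact.layout.count : Int), some (compact.layout.tokens compact.w1.length 0 (-1))) := by decide +kernel
theorem compact.valid_d (n : Nat) (ts0 : Tokens) (h0 : ts0.length = n) (hn : n ≤ 2147483648) (hc : compact.layout.count ≤ n) :
    run Config.default compact.text (some ts0) n =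
      some ((compact.layout.count : Int), some (stamp Config.default (compact.layout.tokens compact.w1.length 0 (-1)) ts0 ++ ts0.drop compact.layout.count)) := by
  rw [← compact.text_eq]; exact run_default_valid compact.w1 compact.layout compact.w2 (by decide) (by decide) compact.wf (by decide +kernel) n ts0 h0 hn hc
theorem compact.valid_s (n : Nat) (ts0 : Tokens) (h0 : ts0.length = n) (hn : n ≤ 2147483648) (hc : compact.layout.count ≤ n) :
    run Config.strictLinks compact.text (some ts0) n = some ((compact.layout.count : Int), some (compact.layout.tokens compact.w1.length 0 (-1) ++ ts0.drop compact.layout.count)) := by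
  rw [← compact.text_eq]; exact run_strictLinks_valid compact.w1 compact.layout compact.w2 (by decide) (by decide) compact.wf (by decide) (by decide +kernel) n ts0 h0 hn hc

/-! ### arr_mixed: '[1,"two",3.0,true,false,null,{},[]]' -/
def arr_mixed.text : List UInt8 :=
  [0x5b, 0x31, 0x2c, 0x22, 0x74, 0x77, 0x6f, 0x22, 0x2c, 0x33, 0x2e, 0x30, 0x2c, 0x74, 0x72, 0x75, 0x65, 0x2c, 0x66, 0x61, 0x6c, 0x73, 0x65, 0x2c, 0x6e, 0x75, 0x6c, 0x6c, 0x2c, 0x7b, 0x7d, 0x2c, 0x5b, 0x5d, 0x5d]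
def arr_mixed.w1 : List UInt8 := []
def arr_mixed.w2 : List UInt8 := []
def arr_mixed.layout : Layout :=
  .array [] (.cons [] (.number [0x31]) [] (.cons [] (.string [0x74, 0x77, 0x6f]) [] (.cons [] (.number [0x33, 0x2e, 0x30]) [] (.cons [] .true [] (.cons [] .false [] (.cons [] .null [] (.cons [] (.object [] .nil) [] (.cons [] (.array [] .nil) [] .nil))))))))
theorem arr_mixed.text_eq : arr_mixed.w1 ++ arr_mixed.layout.text ++ arr_mixed.w2 = arr_mixed.text := by decide +kernel
theorem arr_mixed.wf : arr_mixed.layout.WellFormed := by decide +kernel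
theorem arr_mixed.prints : Prints arr_mixed.layout.value arr_mixed.text := Prints.of_layout (by decide) (by decide) arr_mixed.wf arr_mixed.text_eq
theorem arr_mixed.run_d : run Config.default arr_mixed.text (some (List.replicate arr_mixed.layout.count default)) arr_mixed.layout.count =
    some ((arr_mixed.layout.count : Int), some (arr_mixed.layout.tokens arr_mixed.w1.length 0 (-1) |>.map fun t => { t with parent := 0 })) := by decide +kernel
theorem arr_mixed.run_s : run Config.strictLinks arr_mixed.text (some (List.replicate arr_mixed.layout.count default)) arr_mixed.layout.count =
    some ((arr_mixed.layout.count : Int), some (arr_mixed.layout.tokens arr_mixed.w1.length 0 (-1))) := by decide +kernel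
theorem arr_mixed.valid_d (n : Nat) (ts0 : Tokens) (h0 : ts0.length = n) (hn : n ≤ 2147483648) (hc : arr_mixed.layout.count ≤ n) :
    run Config.default arr_mixed.text (some ts0) n =
      some ((arr_mixed.layout.count : Int), some (stamp Config.default (arr_mixed.layout.tokens arr_mixed.w1.length 0 (-1)) ts0 ++ ts0.drop arr_mixed.layout.count)) := by
  rw [← arr_mixed.text_eq]; exact run_default_valid arr_mixed.w1 arr_mixed.layout arr_mixed.w2 (by decide) (by decide) arr_mixed.wf (by decide +kernel) n ts0 h0 hn hc
theorem arr_mixed.valid_s (n : Nat) (ts0 : Tokens) (h0 : ts0.length = n) (hn : n ≤ 2147483648) (hc : arr_mixed.layout.count ≤ n) :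
    run Config.strictLinks arr_mixed.text (some ts0) n = some ((arr_mixed.layout.count : Int), some (arr_mixed.layout.tokens arr_mixed.w1.length 0 (-1) ++ ts0.drop arr_mixed.layout.count)) := by
  rw [← arr_mixed.text_eq]; exact run_strictLinks_valid arr_mixed.w1 arr_mixed.layout arr_mixed.w2 (by decide) (by decide) arr_mixed.wf (by decide) (by decide +kernel) n ts0 h0 hn hc

/-! ### obj_in_arr: '[{"a":1},{"b":2},{"c":3}]' -/
def obj_in_arr.text : List UInt8 :=
  [0x5b, 0x7b, 0x22, 0x61, 0x22, 0x3a, 0x31, 0x7d, 0x2c, 0x7b, 0x22, 0x62, 0x22, 0x3a, 0x32, 0x7d, 0x2c, 0x7b, 0x22, 0x63, 0x22, 0x3a, 0x33, 0x7d, 0x5d]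
def obj_in_arr.w1 : List UInt8 := []
def obj_in_arr.w2 : List UInt8 := []
def obj_in_arr.layout : Layout :=
  .array [] (.cons [] (.object [] (.cons [] [0x61] [] [] (.number [0x31]) [] .nil)) [] (.cons [] (.object [] (.cons [] [0x62] [] [] (.number [0x32]) [] .nil)) [] (.cons [] (.object [] (.cons [] [0x63] [] [] (.number [0x33]) [] .nil)) [] .nil)))
theorem obj_in_arr.text_eq : obj_in_arr.w1 ++ obj_in_arr.layout.text ++ obj_in_arr.w2 = obj_in_arr.text := by decide +kernel
theorem obj_in_arr.wf : obj_in_arr.layout.WellFormed := by decide +kernel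
theorem obj_in_arr.prints : Prints obj_in_arr.layout.value obj_in_arr.text := Prints.of_layout (by decide) (by decide) obj_in_arr.wf obj_in_arr.text_eq
theorem obj_in_arr.run_d : run Config.default obj_in_arr.text (some (List.replicate obj_in_arr.layout.count default)) obj_in_arr.layout.count =
    some ((obj_in_arr.layout.count : Int), some (obj_in_arr.layout.tokens obj_in_arr.w1.length 0 (-1) |>.map fun t => { t with parent := 0 })) := by decide +kernel
theorem obj_in_arr.run_s : run Config.strictLinks obj_in_arr.text (some (List.replicate obj_in_arr.layout.count default)) obj_in_arr.layout.count =
    some ((obj_in_arr.layout.count : Int), some (obj_in_arr.layout.tokens obj_in_arr.w1.length 0 (-1))) := by decide +kernel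
theorem obj_in_arr.valid_d (n : Nat) (ts0 : Tokens) (h0 : ts0.length = n) (hn : n ≤ 2147483648) (hc : obj_in_arr.layout.count ≤ n) :
    run Config.default obj_in_arr.text (some ts0) n =
      some ((obj_in_arr.layout.count : Int), some (stamp Config.default (obj_in_arr.layout.tokens obj_in_arr.w1.length 0 (-1)) ts0 ++ ts0.drop obj_in_arr.layout.count)) := by
  rw [← obj_in_arr.text_eq]; exact run_default_valid obj_in_arr.w1 obj_in_arr.layout obj_in_arr.w2 (by decide) (by decide) obj_in_arr.wf (by decide +kernel) n ts0 h0 hn hc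
theorem obj_in_arr.valid_s (n : Nat) (ts0 : Tokens) (h0 : ts0.length = n) (hn : n ≤ 2147483648) (hc : obj_in_arr.layout.count ≤ n) :
    run Config.strictLinks obj_in_arr.text (some ts0) n = some ((obj_in_arr.layout.count : Int), some (obj_in_arr.layout.tokens obj_in_arr.w1.length 0 (-1) ++ ts0.drop obj_in_arr.layout.count)) := by
  rw [← obj_in_arr.text_eq]; exact run_strictLinks_valid obj_in_arr.w1 obj_in_arr.layout obj_in_arr.w2 (by decide) (by decide) obj_in_arr.wf (by decide) (by decide +kernel) n ts0 h0 hn hc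

/-! ### arr_in_obj: '{"a":[1,2],"b":[3,4]}' -/
def arr_in_obj.text : List UInt8 :=
  [0x7b, 0x22, 0x61, 0x22, 0x3a, 0x5b, 0x31, 0x2c, 0x32, 0x5d, 0x2c, 0x22, 0x62, 0x22, 0x3a, 0x5b, 0x33, 0x2c, 0x34, 0x5d, 0x7d]
def arr_in_obj.w1 : List UInt8 := []
def arr_in_obj.w2 : List UInt8 := []
def arr_in_obj.layout : Layout :=
  .object [] (.cons [] [0x61] [] [] (.array [] (.cons [] (.number [0x31]) [] (.cons [] (.number [0x32]) [] .nil))) [] (.cons [] [0x62] [] [] (.array [] (.cons [] (.number [0x33]) [] (.cons [] (.number [0x34]) [] .nil))) [] .nil))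
theorem arr_in_obj.text_eq : arr_in_obj.w1 ++ arr_in_obj.layout.text ++ arr_in_obj.w2 = arr_in_obj.text := by decide +kernel
theorem arr_in_obj.wf : arr_in_obj.layout.WellFormed := by decide +kernel
theorem arr_in_obj.prints : Prints arr_in_obj.layout.value arr_in_obj.text := Prints.of_layout (by decide) (by decide) arr_in_obj.wf arr_in_obj.text_eq
theorem arr_in_obj.run_d : run Config.default arr_in_obj.text (some (List.replicate arr_in_obj.layout.count default)) arr_in_obj.layout.count =
    some ((arr_in_obj.layout.count : Int), some (arr_in_obj.layout.tokens arr_in_obj.w1.length 0 (-1) |>.map fun t => { t with parent := 0 })) := by decide +kernel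
theorem arr_in_obj.run_s : run Config.strictLinks arr_in_obj.text (some (List.replicate arr_in_obj.layout.count default)) arr_in_obj.layout.count =
    some ((arr_in_obj.layout.count : Int), some (arr_in_obj.layout.tokens arr_in_obj.w1.length 0 (-1))) := by decide +kernel
theorem arr_in_obj.valid_d (n : Nat) (ts0 : Tokens) (h0 : ts0.length = n) (hn : n ≤ 2147483648) (hc : arr_in_obj.layout.count ≤ n) :
    run Config.default arr_in_obj.text (some ts0) n =
      some ((arr_in_obj.layout.count : Int), some (stamp Config.default (arr_in_obj.layout.tokens arr_in_obj.w1.length 0 (-1)) ts0 ++ ts0.drop arr_in_obj.layout.count)) := by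
  rw [← arr_in_obj.text_eq]; exact run_default_valid arr_in_obj.w1 arr_in_obj.layout arr_in_obj.w2 (by decide) (by decide) arr_in_obj.wf (by decide +kernel) n ts0 h0 hn hc
theorem arr_in_obj.valid_s (n : Nat) (ts0 : Tokens) (h0 : ts0.length = n) (hn : n ≤ 2147483648) (hc : arr_in_obj.layout.count ≤ n) :
    run Config.strictLinks arr_in_obj.text (some ts0) n = some ((arr_in_obj.layout.count : Int), some (arr_in_obj.layout.tokens arr_in_obj.w1.length 0 (-1) ++ ts0.drop arr_in_obj.layout.count)) := by
  rw [← arr_in_obj.text_eq]; exact run_strictLinks_valid arr_in_obj.w1 arr_in_obj.layout arr_in_obj.w2 (by decide) (by decide) arr_in_obj.wf (by decide) (by decide +kernel) n ts0 h0 hn hc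

/-! ### empty_key: '{"":0}' -/
def empty_key.text : List UInt8 :=
  [0x7b, 0x22, 0x22, 0x3a, 0x30, 0x7d]
def empty_key.w1 : List UInt8 := []
def empty_key.w2 : List UInt8 := []
def empty_key.layout : Layout :=
  .object [] (.cons [] [] [] [] (.number [0x30]) [] .nil)
theorem empty_key.text_eq : empty_key.w1 ++ empty_key.layout.text ++ empty_key.w2 = empty_key.text := by decide +kernel
theorem empty_key.wf : empty_key.layout.WellFormed := by decide +kernel
theorem empty_key.prints : Prints empty_key.layout.value empty_key.text := Prints.of_layout (by decide) (by decide) empty_key.wf empty_key.text_eq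
theorem empty_key.run_d : run Config.default empty_key.text (some (List.replicate empty_key.layout.count default)) empty_key.layout.count =
    some ((empty_key.layout.count : Int), some (empty_key.layout.tokens empty_key.w1.length 0 (-1) |>.map fun t => { t with parent := 0 })) := by decide +kernel
theorem empty_key.run_s : run Config.strictLinks empty_key.text (some (List.replicate empty_key.layout.count default)) empty_key.layout.count =
    some ((empty_key.layout.count : Int), some (empty_key.layout.tokens empty_key.w1.length 0 (-1))) := by decide +kernel
theorem empty_key.valid_d (n : Nat) (ts0 : Tokens) (h0 : ts0.length = n) (hn : n ≤ 2147483648) (hc : empty_key.layout.count ≤ n) :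
    run Config.default empty_key.text (some ts0) n =
      some ((empty_key.layout.count : Int), some (stamp Config.default (empty_key.layout.tokens empty_key.w1.length 0 (-1)) ts0 ++ ts0.drop empty_key.layout.count)) := by
  rw [← empty_key.text_eq]; exact run_default_valid empty_key.w1 empty_key.layout empty_key.w2 (by decide) (by decide) empty_key.wf (by decide +kernel) n ts0 h0 hn hc
theorem empty_key.valid_s (n : Nat) (ts0 : Tokens) (h0 : ts0.length = n) (hn : n ≤ 2147483648) (hc : empty_key.layout.count ≤ n) :
    run Config.strictLinks empty_key.text (some ts0) n = some ((empty_key.layout.count : Int), some (empty_key.layout.tokens empty_key.w1.length 0 (-1) ++ ts0.drop empty_key.layout.count)) := by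
  rw [← empty_key.text_eq]; exact run_strictLinks_valid empty_key.w1 empty_key.layout empty_key.w2 (by decide) (by decide) empty_key.wf (by decide) (by decide +kernel) n ts0 h0 hn hc

/-! ### dup_keys: '{"a":1,"a":2}' -/
def dup_keys.text : List UInt8 :=
  [0x7b, 0x22, 0x61, 0x22, 0x3a, 0x31, 0x2c, 0x22, 0x61, 0x22, 0x3a, 0x32, 0x7d]
def dup_keys.w1 : List UInt8 := []
def dup_keys.w2 : List UInt8 := []
def dup_keys.layout : Layout :=
  .object [] (.cons [] [0x61] [] [] (.number [0x31]) [] (.cons [] [0x61] [] [] (.number [0x32]) [] .nil))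
theorem dup_keys.text_eq : dup_keys.w1 ++ dup_keys.layout.text ++ dup_keys.w2 = dup_keys.text := by decide +kernel
theorem dup_keys.wf : dup_keys.layout.WellFormed := by decide +kernel
theorem dup_keys.prints : Prints dup_keys.layout.value dup_keys.text := Prints.of_layout (by decide) (by decide) dup_keys.wf dup_keys.text_eq
theorem dup_keys.run_d : run Config.default dup_keys.text (some (List.replicate dup_keys.layout.count default)) dup_keys.layout.count =
    some ((dup_keys.layout.count : Int), some (dup_keys.layout.tokens dup_keys.w1.length 0 (-1) |>.map fun t => { t with parent := 0 })) := by decide +kernel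
theorem dup_keys.run_s : run Config.strictLinks dup_keys.text (some (List.replicate dup_keys.layout.count default)) dup_keys.layout.count =
    some ((dup_keys.layout.count : Int), some (dup_keys.layout.tokens dup_keys.w1.length 0 (-1))) := by decide +kernel
theorem dup_keys.valid_d (n : Nat) (ts0 : Tokens) (h0 : ts0.length = n) (hn : n ≤ 2147483648) (hc : dup_keys.layout.count ≤ n) :
    run Config.default dup_keys.text (some ts0) n =
      some ((dup_keys.layout.count : Int), some (stamp Config.default (dup_keys.layout.tokens dup_keys.w1.length 0 (-1)) ts0 ++ ts0.drop dup_keys.layout.count)) := by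
  rw [← dup_keys.text_eq]; exact run_default_valid dup_keys.w1 dup_keys.layout dup_keys.w2 (by decide) (by decide) dup_keys.wf (by decide +kernel) n ts0 h0 hn hc
theorem dup_keys.valid_s (n : Nat) (ts0 : Tokens) (h0 : ts0.length = n) (hn : n ≤ 2147483648) (hc : dup_keys.layout.count ≤ n) :
    run Config.strictLinks dup_keys.text (some ts0) n = some ((dup_keys.layout.count : Int), some (dup_keys.layout.tokens dup_keys.w1.length 0 (-1) ++ ts0.drop dup_keys.layout.count)) := by
  rw [← dup_keys.text_eq]; exact run_strictLinks_valid dup_keys.w1 dup_keys.layout dup_keys.w2 (by decide) (by decide) dup_keys.wf (by decide) (by decide +kernel) n ts0 h0 hn hc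

/-! ### str_only_esc: '"\\n"' -/
def str_only_esc.text : List UInt8 :=
  [0x22, 0x5c, 0x6e, 0x22]
def str_only_esc.w1 : List UInt8 := []
def str_only_esc.w2 : List UInt8 := []
def str_only_esc.layout : Layout :=
  .string [0x5c, 0x6e]
theorem str_only_esc.text_eq : str_only_esc.w1 ++ str_only_esc.layout.text ++ str_only_esc.w2 = str_only_esc.text := by decide +kernel
theorem str_only_esc.wf : str_only_esc.layout.WellFormed := by decide +kernel
theorem str_only_esc.prints : Prints str_only_esc.layout.value str_only_esc.text := Prints.of_layout (by decide) (by decide) str_only_esc.wf str_only_esc.text_eq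
theorem str_only_esc.run_d : run Config.default str_only_esc.text (some (List.replicate str_only_esc.layout.count default)) str_only_esc.layout.count =
    some ((str_only_esc.layout.count : Int), some (str_only_esc.layout.tokens str_only_esc.w1.length 0 (-1) |>.map fun t => { t with parent := 0 })) := by decide +kernel
theorem str_only_esc.run_s : run Config.strictLinks str_only_esc.text (some (List.replicate str_only_esc.layout.count default)) str_only_esc.layout.count =
    some ((str_only_esc.layout.count : Int), some (str_only_esc.layout.tokens str_only_esc.w1.length 0 (-1))) := by decide +kernel
theorem str_only_esc.valid_d (n : Nat) (ts0 : Tokens) (h0 : ts0.length = n) (hn : n ≤ 2147483648) (hc : str_only_esc.layout.count ≤ n) :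
    run Config.default str_only_esc.text (some ts0) n =
      some ((str_only_esc.layout.count : Int), some (stamp Config.default (str_only_esc.layout.tokens str_only_esc.w1.length 0 (-1)) ts0 ++ ts0.drop str_only_esc.layout.count)) := by
  rw [← str_only_esc.text_eq]; exact run_default_valid str_only_esc.w1 str_only_esc.layout str_only_esc.w2 (by decide) (by decide) str_only_esc.wf (by decide +kernel) n ts0 h0 hn hc
theorem str_only_esc.valid_s (n : Nat) (ts0 : Tokens) (h0 : ts0.length = n) (hn : n ≤ 2147483648) (hc : str_only_esc.layout.count ≤ n) :
    run Config.strictLinks str_only_esc.text (some ts0) n = some ((str_only_esc.layout.count : Int), some (str_only_esc.layout.tokens str_only_esc.w1.length 0 (-1) ++ ts0.drop str_only_esc.layout.count)) := by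
  rw [← str_only_esc.text_eq]; exact run_strictLinks_valid str_only_esc.w1 str_only_esc.layout str_only_esc.w2 (by decide) (by decide) str_only_esc.wf (by decide) (by decide +kernel) n ts0 h0 hn hc

/-! ### top_ws_str: '  "a"  ' -/
def top_ws_str.text : List UInt8 :=
  [0x20, 0x20, 0x22, 0x61, 0x22, 0x20, 0x20]
def top_ws_str.w1 : List UInt8 := [0x20, 0x20]
def top_ws_str.w2 : List UInt8 := [0x20, 0x20]
def top_ws_str.layout : Layout :=
  .string [0x61]
theorem top_ws_str.text_eq : top_ws_str.w1 ++ top_ws_str.layout.text ++ top_ws_str.w2 = top_ws_str.text := by decide +kernel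
theorem top_ws_str.wf : top_ws_str.layout.WellFormed := by decide +kernel
theorem top_ws_str.prints : Prints top_ws_str.layout.value top_ws_str.text := Prints.of_layout (by decide) (by decide) top_ws_str.wf top_ws_str.text_eq
theorem top_ws_str.run_d : run Config.default top_ws_str.text (some (List.replicate top_ws_str.layout.count default)) top_ws_str.layout.count =
    some ((top_ws_str.layout.count : Int), some (top_ws_str.layout.tokens top_ws_str.w1.length 0 (-1) |>.map fun t => { t with parent := 0 })) := by decide +kernel
theorem top_ws_str.run_s : run Config.strictLinks top_ws_str.text (some (List.replicate top_ws_str.layout.count default)) top_ws_str.layout.count =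
    some ((top_ws_str.layout.count : Int), some (top_ws_str.layout.tokens top_ws_str.w1.length 0 (-1))) := by decide +kernel
theorem top_ws_str.valid_d (n : Nat) (ts0 : Tokens) (h0 : ts0.length = n) (hn : n ≤ 2147483648) (hc : top_ws_str.layout.count ≤ n) :
    run Config.default top_ws_str.text (some ts0) n =
      some ((top_ws_str.layout.count : Int), some (stamp Config.default (top_ws_str.layout.tokens top_ws_str.w1.length 0 (-1)) ts0 ++ ts0.drop top_ws_str.layout.count)) := by
  rw [← top_ws_str.text_eq]; exact run_default_valid top_ws_str.w1 top_ws_str.layout top_ws_str.w2 (by decide) (by decide) top_ws_str.wf (by decide +kernel) n ts0 h0 hn hc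
theorem top_ws_str.valid_s (n : Nat) (ts0 : Tokens) (h0 : ts0.length = n) (hn : n ≤ 2147483648) (hc : top_ws_str.layout.count ≤ n) :
    run Config.strictLinks top_ws_str.text (some ts0) n = some ((top_ws_str.layout.count : Int), some (top_ws_str.layout.tokens top_ws_str.w1.length 0 (-1) ++ ts0.drop top_ws_str.layout.count)) := by
  rw [← top_ws_str.text_eq]; exact run_strictLinks_valid top_ws_str.w1 top_ws_str.layout top_ws_str.w2 (by decide) (by decide) top_ws_str.wf (by decide) (by decide +kernel) n ts0 h0 hn hc

/-! ### nested_empty: '[{},[],{"a":{}},[[]]]' -/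
def nested_empty.text : List UInt8 :=
  [0x5b, 0x7b, 0x7d, 0x2c, 0x5b, 0x5d, 0x2c, 0x7b, 0x22, 0x61, 0x22, 0x3a, 0x7b, 0x7d, 0x7d, 0x2c, 0x5b, 0x5b, 0x5d, 0x5d, 0x5d]
def nested_empty.w1 : List UInt8 := []
def nested_empty.w2 : List UInt8 := []
def nested_empty.layout : Layout :=
  .array [] (.cons [] (.object [] .nil) [] (.cons [] (.array [] .nil) [] (.cons [] (.object [] (.cons [] [0x61] [] [] (.object [] .nil) [] .nil)) [] (.cons [] (.array [] (.cons [] (.array [] .nil) [] .nil)) [] .nil))))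
theorem nested_empty.text_eq : nested_empty.w1 ++ nested_empty.layout.text ++ nested_empty.w2 = nested_empty.text := by decide +kernel
theorem nested_empty.wf : nested_empty.layout.WellFormed := by decide +kernel
theorem nested_empty.prints : Prints nested_empty.layout.value nested_empty.text := Prints.of_layout (by decide) (by decide) nested_empty.wf nested_empty.text_eq
theorem nested_empty.run_d : run Config.default nested_empty.text (some (List.replicate nested_empty.layout.count default)) nested_empty.layout.count =
    some ((nested_empty.layout.count : Int), some (nested_empty.layout.tokens nested_empty.w1.length 0 (-1) |>.map fun t => { t with parent := 0 })) := by decide +kernel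
theorem nested_empty.run_s : run Config.strictLinks nested_empty.text (some (List.replicate nested_empty.layout.count default)) nested_empty.layout.count =
    some ((nested_empty.layout.count : Int), some (nested_empty.layout.tokens nested_empty.w1.length 0 (-1))) := by decide +kernel
theorem nested_empty.valid_d (n : Nat) (ts0 : Tokens) (h0 : ts0.length = n) (hn : n ≤ 2147483648) (hc : nested_empty.layout.count ≤ n) :
    run Config.default nested_empty.text (some ts0) n =
      some ((nested_empty.layout.count : Int), some (stamp Config.default (nested_empty.layout.tokens nested_empty.w1.length 0 (-1)) ts0 ++ ts0.drop nested_empty.layout.count)) := by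
  rw [← nested_empty.text_eq]; exact run_default_valid nested_empty.w1 nested_empty.layout nested_empty.w2 (by decide) (by decide) nested_empty.wf (by decide +kernel) n ts0 h0 hn hc
theorem nested_empty.valid_s (n : Nat) (ts0 : Tokens) (h0 : ts0.length = n) (hn : n ≤ 2147483648) (hc : nested_empty.layout.count ≤ n) :
    run Config.strictLinks nested_empty.text (some ts0) n = some ((nested_empty.layout.count : Int), some (nested_empty.layout.tokens nested_empty.w1.length 0 (-1) ++ ts0.drop nested_empty.layout.count)) := by
  rw [← nested_empty.text_eq]; exact run_strictLinks_valid nested_empty.w1 nested_empty.layout nested_empty.w2 (by decide) (by decide) nested_empty.wf (by decide) (by decide +kernel) n ts0 h0 hn hc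

end Json.Examples
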